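-- pv_equiv track=rewrite | github.com/sharanyamarineni/competetive-programming | week3/day1/SingleRiffleShuffle.py | is_single_riffle
-- ===== SOURCE A (Python) =====
-- def is_single_riffle(half1, half2, shuffled_deck):
--     l=half1
--     l1=half2
--     i=0
--     j=0
--     l2=shuffled_deck
--     while(i<len(l) and j<len(l1)):
--     	if(l[i]<l1[j]):
--     		if(l2[i+j]!=l[i]):
--     			return False
--     		i=i+1
--     	else:
--     		if(l2[i+j]!=l1[j]):
--     			return False
--     		j=j+1
--     while(i<len(l)):
--     	if(l2[i+j]!=l[i]):
--     		return False
--     	i=i+1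
--     while(j<len(l1)):
--     	if(l2[i+j]!=l1[j]):
--     		return False
--     	j=j+1
--     if(len(l)+len(l1)<len(l2)):
--         return False
--     return True
-- ===== SOURCE B (Python) =====
-- def is_single_riffle(half1, half2, shuffled_deck):
--     # Deck-driven single pass: walk the shuffled deck once, consuming the two
--     # halves as stacks; each deck card must be the forced next card
--     # (half1's head only when it is strictly smaller, ties go to half2).
--     rest1 = half1[::-1]
--     rest2 = half2[::-1]
--     for card in shuffled_deck:
--         if rest1 and (not rest2 or rest1[-1] < rest2[-1]):
--             if card != rest1.pop():
--                 return False
--         elif rest2: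
--             if card != rest2.pop():
--                 return False
--         else:
--             return False  # deck longer than both halves together
--     return not rest1 and not rest2
-- ===== Notes on version B (the rewrite author's own statement) =====
-- stated objective: alternative
-- what changed: A merges the two halves with index pointers in three while loops, indexing shuffled_deck at i+j and finishing with a one-sided length guard; B never indexes the deck: it walks shuffled_deck once, consumes the halves as stacks (reversed copies popped from the end), rejects a too-long deck inside the loop and a too-short deck by a final emptiness check, so it raises no IndexError.
import Mathlib
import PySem

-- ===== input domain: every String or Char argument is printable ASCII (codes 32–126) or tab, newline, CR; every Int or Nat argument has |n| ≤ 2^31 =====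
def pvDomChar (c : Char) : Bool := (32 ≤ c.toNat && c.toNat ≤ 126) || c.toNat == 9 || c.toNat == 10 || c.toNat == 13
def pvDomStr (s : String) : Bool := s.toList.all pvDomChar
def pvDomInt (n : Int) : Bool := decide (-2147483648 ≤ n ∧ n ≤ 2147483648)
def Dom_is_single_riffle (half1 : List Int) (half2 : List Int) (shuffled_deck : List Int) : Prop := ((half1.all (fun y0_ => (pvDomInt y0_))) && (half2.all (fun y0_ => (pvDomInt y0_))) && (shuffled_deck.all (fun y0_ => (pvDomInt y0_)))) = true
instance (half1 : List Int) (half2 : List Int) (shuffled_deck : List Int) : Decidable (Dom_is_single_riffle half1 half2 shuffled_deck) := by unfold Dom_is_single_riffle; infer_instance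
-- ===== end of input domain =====

-- B replaces A's index-pointer merge (three while loops indexing shuffled_deck at i+j plus a
-- length guard) by one deck-driven pass that pops the halves as stacks and never indexes the
-- deck, so it returns False (instead of raising) on a too-short deck (objective: alternative).

-- ===== PORT A =====
-- third while loop: while j < len(l1); then the final length check and return
def pvLoop3 (l l1 l2 : List Int) (i j : Nat) : Bool :=
  if h : j < l1.length then
    match PySem.List.pyGet? l2 ((i : Int) + (j : Int)) with
    | none => false                      -- Python raises IndexError here; excluded by Pre_
    | some c => if c ≠ l1[j] then false else pvLoop3 l l1 l2 i (j + 1)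
  else if l.length + l1.length < l2.length then false else true
termination_by l1.length - j

-- second while loop: while i < len(l)
def pvLoop2 (l l1 l2 : List Int) (i j : Nat) : Bool :=
  if h : i < l.length then
    match PySem.List.pyGet? l2 ((i : Int) + (j : Int)) with
    | none => false                      -- Python raises IndexError here; excluded by Pre_
    | some c => if c ≠ l[i] then false else pvLoop2 l l1 l2 (i + 1) j
  else pvLoop3 l l1 l2 i j
termination_by l.length - i

-- first while loop: while i < len(l) and j < len(l1)
def pvLoop1 (l l1 l2 : List Int) (i j : Nat) : Bool :=
  if h : i < l.length ∧ j < l1.length then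
    if l[i]'h.1 < l1[j]'h.2 then
      match PySem.List.pyGet? l2 ((i : Int) + (j : Int)) with
      | none => false                    -- Python raises IndexError here; excluded by Pre_
      | some c => if c ≠ l[i]'h.1 then false else pvLoop1 l l1 l2 (i + 1) j
    else
      match PySem.List.pyGet? l2 ((i : Int) + (j : Int)) with
      | none => false                    -- Python raises IndexError here; excluded by Pre_
      | some c => if c ≠ l1[j]'h.2 then false else pvLoop1 l l1 l2 i (j + 1)
  else pvLoop2 l l1 l2 i j
termination_by l.length - i + (l1.length - j)
decreasing_by all_goals omega

def is_single_riffle (half1 : List Int) (half2 : List Int) (shuffled_deck : List Int) : Bool :=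
  pvLoop1 half1 half2 shuffled_deck 0 0

-- ===== PORT B =====
-- Source B's for-loop over shuffled_deck, carrying the two stacks rest1, rest2
-- (rest[-1] → .getLast!, rest.pop() → .dropLast; Int is inhabited so getLast! is exact here,
-- and the branch guards it exactly as Source B's truthiness tests do)
def pvAltLoop (d rest1 rest2 : List Int) : Bool :=
  match d with
  | [] => rest1.isEmpty && rest2.isEmpty
  | card :: ds =>
    if !rest1.isEmpty && (rest2.isEmpty || decide (rest1.getLast! < rest2.getLast!)) then
      if card ≠ rest1.getLast! then false else pvAltLoop ds rest1.dropLast rest2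
    else if !rest2.isEmpty then
      if card ≠ rest2.getLast! then false else pvAltLoop ds rest1 rest2.dropLast
    else false

def is_single_riffle_alt (half1 : List Int) (half2 : List Int) (shuffled_deck : List Int) : Bool :=
  pvAltLoop shuffled_deck half1.reverse half2.reverse

-- ===== PRECONDITION & SPEC =====
-- mathematical characterisation of the riffle merge, used only by Pre_ and the proofs
def pvMergeGo (x : Int) (xs : List Int) (f : List Int → List Int) : List Int → List Int
  | [] => x :: xs
  | y :: ys => if x < y then x :: f (y :: ys) else y :: pvMergeGo x xs f ys

def pvMerge : List Int → List Int → List Int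
  | [], ys => ys
  | x :: xs, ys => pvMergeGo x xs (pvMerge xs) ys

-- Pre_ excludes exactly the inputs on which A raises IndexError (and returns no value):
-- those where shuffled_deck is a proper prefix of the riffle merge of half1 and half2.
def Pre_is_single_riffle (half1 : List Int) (half2 : List Int) (shuffled_deck : List Int) : Prop :=
  ¬ (shuffled_deck.length < half1.length + half2.length ∧
     shuffled_deck = (pvMerge half1 half2).take shuffled_deck.length)
instance (half1 : List Int) (half2 : List Int) (shuffled_deck : List Int) : Decidable (Pre_is_single_riffle half1 half2 shuffled_deck) := by unfold Pre_is_single_riffle; infer_instance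

def pvWitness_is_single_riffle : List Int × List Int × List Int := ([1, 3], [2, 4], [1, 2, 3, 4])

def Spec_is_single_riffle (half1 : List Int) (half2 : List Int) (shuffled_deck : List Int) (out : Bool) : Prop := out = is_single_riffle_alt half1 half2 shuffled_deck
instance (half1 : List Int) (half2 : List Int) (shuffled_deck : List Int) (out : Bool) : Decidable (Spec_is_single_riffle half1 half2 shuffled_deck out) := by unfold Spec_is_single_riffle; infer_instance

-- ===== CLAIM (what is proved, stated in full; the proofs are below) =====
def Claim_equal_is_single_riffle : Prop := ∀ (half1 : List Int) (half2 : List Int) (shuffled_deck : List Int), Dom_is_single_riffle half1 half2 shuffled_deck → Pre_is_single_riffle half1 half2 shuffled_deck → Spec_is_single_riffle half1 half2 shuffled_deck (is_single_riffle half1 half2 shuffled_deck)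

-- ===== LEMMAS AND PROOFS =====

@[simp] theorem pvMerge_nil_left (ys : List Int) : pvMerge [] ys = ys := rfl

@[simp] theorem pvMerge_nil_right (xs : List Int) : pvMerge xs [] = xs := by
  cases xs <;> rfl

theorem pvMerge_cons_cons (x y : Int) (xs ys : List Int) :
    pvMerge (x :: xs) (y :: ys) =
      if x < y then x :: pvMerge xs (y :: ys) else y :: pvMerge (x :: xs) ys := rfl

theorem pv_decide_cons_ne {c d : Int} {X Y : List Int} (h : c ≠ d) :
    false = decide (c :: X = d :: Y) := by simp [h]

theorem pv_decide_cons_eq {c d : Int} {X Y : List Int} (h : c = d) :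
    decide (X = Y) = decide (c :: X = d :: Y) := by simp [h]

theorem pvLoop3_eq (l l1 l2 : List Int) (j : Nat) (hj : j ≤ l1.length) :
    pvLoop3 l l1 l2 l.length j = decide (l2.drop (l.length + j) = l1.drop j) := by
  fun_induction pvLoop3 l l1 l2 l.length j with
  | case1 j hlt hnone =>
    rw [← Nat.cast_add, PySem.List.pyGet?_natCast] at hnone
    have h2 : l2.length ≤ l.length + j := by simpa using List.getElem?_eq_none_iff.mp hnone
    rw [List.drop_of_length_le h2, List.drop_eq_getElem_cons hlt]
    symm
    rw [decide_eq_false_iff_not]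
    exact fun hEq => List.cons_ne_nil _ _ hEq.symm
  | case2 j hlt c hsome hne =>
    rw [← Nat.cast_add, PySem.List.pyGet?_natCast] at hsome
    obtain ⟨hlen, heq⟩ := List.getElem?_eq_some_iff.mp hsome
    rw [List.drop_eq_getElem_cons hlen, List.drop_eq_getElem_cons hlt, heq]
    exact pv_decide_cons_ne hne
  | case3 j hlt c hsome hne ih =>
    have hc : c = l1[j] := not_ne_iff.mp hne
    rw [← Nat.cast_add, PySem.List.pyGet?_natCast] at hsome
    obtain ⟨hlen, heq⟩ := List.getElem?_eq_some_iff.mp hsome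
    rw [ih (by omega), show l.length + (j + 1) = l.length + j + 1 by omega,
        List.drop_eq_getElem_cons hlen, List.drop_eq_getElem_cons hlt, heq]
    exact pv_decide_cons_eq hc
  | case4 j hge hlen =>
    have hj' : j = l1.length := by omega
    subst hj'
    rw [List.drop_length]
    symm
    rw [decide_eq_false_iff_not]
    intro hEq
    have := congrArg List.length hEq
    simp only [List.length_drop, List.length_nil] at this
    omega
  | case5 j hge hlen =>
    have hj' : j = l1.length := by omega
    subst hj'
    rw [List.drop_length, List.drop_of_length_le (by omega)]
    simp

theorem pvLoop2_eq (l l1 l2 : List Int) (i j : Nat)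
    (hi : i ≤ l.length) (hj : j ≤ l1.length) (hd : i = l.length ∨ j = l1.length) :
    pvLoop2 l l1 l2 i j = decide (l2.drop (i + j) = pvMerge (l.drop i) (l1.drop j)) := by
  fun_induction pvLoop2 l l1 l2 i j with
  | case1 i hlt hnone =>
    have hj' : j = l1.length := by omega
    subst hj'
    rw [← Nat.cast_add, PySem.List.pyGet?_natCast] at hnone
    have h2 : l2.length ≤ i + l1.length := by simpa using List.getElem?_eq_none_iff.mp hnone
    rw [List.drop_of_length_le h2, List.drop_length, pvMerge_nil_right,
        List.drop_eq_getElem_cons hlt]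
    symm
    rw [decide_eq_false_iff_not]
    exact fun hEq => List.cons_ne_nil _ _ hEq.symm
  | case2 i hlt c hsome hne =>
    have hj' : j = l1.length := by omega
    subst hj'
    rw [← Nat.cast_add, PySem.List.pyGet?_natCast] at hsome
    obtain ⟨hlen, heq⟩ := List.getElem?_eq_some_iff.mp hsome
    rw [List.drop_length, pvMerge_nil_right, List.drop_eq_getElem_cons hlen,
        List.drop_eq_getElem_cons hlt, heq]
    exact pv_decide_cons_ne hne
  | case3 i hlt c hsome hne ih =>
    have hj' : j = l1.length := by omega
    subst hj'
    have hc : c = l[i] := not_ne_iff.mp hne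
    rw [← Nat.cast_add, PySem.List.pyGet?_natCast] at hsome
    obtain ⟨hlen, heq⟩ := List.getElem?_eq_some_iff.mp hsome
    rw [ih (by omega) (Or.inr rfl), List.drop_length, pvMerge_nil_right, pvMerge_nil_right,
        show i + 1 + l1.length = i + l1.length + 1 by omega,
        List.drop_eq_getElem_cons hlen, List.drop_eq_getElem_cons hlt, heq]
    exact pv_decide_cons_eq hc
  | case4 i hge =>
    have hi' : i = l.length := by omega
    subst hi'
    rw [pvLoop3_eq l l1 l2 j hj, List.drop_length, pvMerge_nil_left]

theorem pvLoop1_eq (l l1 l2 : List Int) (i j : Nat)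
    (hi : i ≤ l.length) (hj : j ≤ l1.length) :
    pvLoop1 l l1 l2 i j = decide (l2.drop (i + j) = pvMerge (l.drop i) (l1.drop j)) := by
  fun_induction pvLoop1 l l1 l2 i j with
  | case1 i j h hab hnone =>
    rw [← Nat.cast_add, PySem.List.pyGet?_natCast] at hnone
    have h2 : l2.length ≤ i + j := by simpa using List.getElem?_eq_none_iff.mp hnone
    rw [List.drop_of_length_le h2, List.drop_eq_getElem_cons h.1, List.drop_eq_getElem_cons h.2,
        pvMerge_cons_cons, if_pos hab]
    symm
    rw [decide_eq_false_iff_not]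
    exact fun hEq => List.cons_ne_nil _ _ hEq.symm
  | case2 i j h hab c hsome hne =>
    rw [← Nat.cast_add, PySem.List.pyGet?_natCast] at hsome
    obtain ⟨hlen, heq⟩ := List.getElem?_eq_some_iff.mp hsome
    rw [List.drop_eq_getElem_cons hlen, heq, List.drop_eq_getElem_cons h.1,
        List.drop_eq_getElem_cons h.2, pvMerge_cons_cons, if_pos hab]
    exact pv_decide_cons_ne hne
  | case3 i j h hab c hsome hne ih =>
    have hc : c = l[i]'h.1 := not_ne_iff.mp hne
    rw [← Nat.cast_add, PySem.List.pyGet?_natCast] at hsome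
    obtain ⟨hlen, heq⟩ := List.getElem?_eq_some_iff.mp hsome
    rw [ih (by omega) hj, show i + 1 + j = i + j + 1 by omega,
        List.drop_eq_getElem_cons hlen, heq, List.drop_eq_getElem_cons h.1,
        List.drop_eq_getElem_cons h.2, pvMerge_cons_cons, if_pos hab,
        ← List.drop_eq_getElem_cons h.2]
    exact pv_decide_cons_eq hc
  | case4 i j h hab hnone =>
    rw [← Nat.cast_add, PySem.List.pyGet?_natCast] at hnone
    have h2 : l2.length ≤ i + j := by simpa using List.getElem?_eq_none_iff.mp hnone
    rw [List.drop_of_length_le h2, List.drop_eq_getElem_cons h.1, List.drop_eq_getElem_cons h.2,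
        pvMerge_cons_cons, if_neg hab]
    symm
    rw [decide_eq_false_iff_not]
    exact fun hEq => List.cons_ne_nil _ _ hEq.symm
  | case5 i j h hab c hsome hne =>
    rw [← Nat.cast_add, PySem.List.pyGet?_natCast] at hsome
    obtain ⟨hlen, heq⟩ := List.getElem?_eq_some_iff.mp hsome
    rw [List.drop_eq_getElem_cons hlen, heq, List.drop_eq_getElem_cons h.1,
        List.drop_eq_getElem_cons h.2, pvMerge_cons_cons, if_neg hab]
    exact pv_decide_cons_ne hne
  | case6 i j h hab c hsome hne ih =>
    have hc : c = l1[j]'h.2 := not_ne_iff.mp hne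
    rw [← Nat.cast_add, PySem.List.pyGet?_natCast] at hsome
    obtain ⟨hlen, heq⟩ := List.getElem?_eq_some_iff.mp hsome
    rw [ih hi (by omega), show i + (j + 1) = i + j + 1 by omega,
        List.drop_eq_getElem_cons hlen, heq, List.drop_eq_getElem_cons h.1,
        List.drop_eq_getElem_cons h.2, pvMerge_cons_cons, if_neg hab,
        ← List.drop_eq_getElem_cons h.1]
    exact pv_decide_cons_eq hc
  | case7 i j h =>
    exact pvLoop2_eq l l1 l2 i j hi hj (by omega)

@[simp] theorem pv_rev_getLast! (x : Int) (xs : List Int) : (x :: xs).reverse.getLast! = x := by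
  rw [List.reverse_cons]
  simp [List.getLast!_eq_getLast?_getD]

@[simp] theorem pv_rev_dropLast (x : Int) (xs : List Int) :
    (x :: xs).reverse.dropLast = xs.reverse := by
  simp [List.reverse_cons]

@[simp] theorem pv_rev_isEmpty (x : Int) (xs : List Int) :
    (x :: xs).reverse.isEmpty = false := by simp

theorem pvAltLoop_eq (d a b : List Int) :
    pvAltLoop d a.reverse b.reverse = decide (d = pvMerge a b) := by
  induction d generalizing a b with
  | nil =>
    cases a with
    | nil =>
      cases b with
      | nil => simp [pvAltLoop]
      | cons y ys => simp [pvAltLoop]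
    | cons x xs =>
      cases b with
      | nil => simp [pvAltLoop]
      | cons y ys =>
        rw [pvMerge_cons_cons]
        by_cases hxy : x < y <;> simp [pvAltLoop, hxy]
  | cons card ds ih =>
    cases a with
    | nil =>
      cases b with
      | nil => simp [pvAltLoop]
      | cons y ys =>
        have hih := ih ([] : List Int) ys
        simp only [List.reverse_nil, pvMerge_nil_left] at hih ⊢
        by_cases hc : card = y
        · subst hc; simp [pvAltLoop, hih]
        · simp [pvAltLoop, hc]
    | cons x xs =>
      cases b with
      | nil =>
        have hih := ih xs ([] : List Int)
        simp only [List.reverse_nil, pvMerge_nil_right] at hih ⊢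
        by_cases hc : card = x
        · subst hc; simp [pvAltLoop, hih]
        · simp [pvAltLoop, hc]
      | cons y ys =>
        rw [pvMerge_cons_cons]
        by_cases hxy : x < y
        · by_cases hc : card = x
          · subst hc
            have hih := ih xs (y :: ys)
            rw [show (y :: ys).reverse = ys.reverse ++ [y] from List.reverse_cons] at hih
            simp [pvAltLoop, hxy, hih]
          · simp [pvAltLoop, hxy, hc]
        · by_cases hc : card = y
          · subst hc
            have hih := ih (x :: xs) ys
            rw [show (x :: xs).reverse = xs.reverse ++ [x] from List.reverse_cons] at hih
            simp [pvAltLoop, hxy, hih]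
          · simp [pvAltLoop, hxy, hc]

-- ===== VERDICT (by name: the statements are the Claim_ definition above) =====
theorem is_single_riffle_spec : Claim_equal_is_single_riffle := by
  intro half1 half2 shuffled_deck _ _
  unfold Spec_is_single_riffle is_single_riffle is_single_riffle_alt
  rw [pvLoop1_eq half1 half2 shuffled_deck 0 0 (by omega) (by omega),
      pvAltLoop_eq shuffled_deck half1 half2]
  simp
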